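-- pv_equiv track=rewrite | github.com/nguyendat2001/taekwondo_asistance | list_function.py | colab_list
-- ===== SOURCE A (Python) =====
-- def colab_list(list1, list2):
--     seri_label = ['pose_1','pose_2','pose_3','pose_4','pose_5','pose_6','pose_7','pose_8',
--               'pose_9','pose_10','pose_11','pose_12','pose_13','pose_14','pose_15','pose_16']
--     list = []
--     for i in seri_label:
--         for l1 in list1:
--             if i == l1:
--                 list.append(i)
--         for l2 in list2:
--             if i == l2:
--                 list.append(i)
--     return list
-- ===== SOURCE B (Python) =====
-- def colab_list(list1, list2):
--     rank = {'pose_%d' % i: i for i in range(1, 17)}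
--     return sorted((x for x in list1 + list2 if x in rank), key=rank.get)
-- ===== Notes on version B (the rewrite author's own statement) =====
-- stated objective: alternative
-- what changed: Instead of scanning both input lists once per canonical label (16 nested rescans), B filters the combined input to known labels in one pass and stable-sorts it by each label's canonical rank; equal labels are identical strings, so sorting by rank yields exactly A's label-grouped order.
import Mathlib
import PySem

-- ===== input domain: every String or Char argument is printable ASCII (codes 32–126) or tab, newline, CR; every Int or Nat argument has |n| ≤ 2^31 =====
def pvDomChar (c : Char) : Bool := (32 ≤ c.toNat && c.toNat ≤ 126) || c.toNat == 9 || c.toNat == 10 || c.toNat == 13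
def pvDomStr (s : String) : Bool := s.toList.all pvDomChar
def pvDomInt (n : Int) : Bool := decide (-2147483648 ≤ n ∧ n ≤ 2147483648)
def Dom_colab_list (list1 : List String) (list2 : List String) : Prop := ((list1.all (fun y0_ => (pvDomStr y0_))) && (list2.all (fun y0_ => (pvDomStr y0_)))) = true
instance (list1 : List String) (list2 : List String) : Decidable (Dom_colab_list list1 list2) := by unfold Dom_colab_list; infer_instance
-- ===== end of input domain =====

-- B replaces A's per-label rescans by one filtering pass over list1+list2 followed by a
-- stable sort on each label's canonical rank (objective: alternative algorithm).

-- ===== PORT A =====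
def colab_list (list1 : List String) (list2 : List String) : List String :=
  let seri_label : List String :=
    ["pose_1","pose_2","pose_3","pose_4","pose_5","pose_6","pose_7","pose_8",
     "pose_9","pose_10","pose_11","pose_12","pose_13","pose_14","pose_15","pose_16"]
  seri_label.foldl (fun lst i =>
    let lst := list1.foldl (fun a l1 => if i == l1 then a ++ [i] else a) lst
    list2.foldl (fun a l2 => if i == l2 then a ++ [i] else a) lst) []

-- ===== PORT B =====
-- rank = {'pose_%d' % i: i for i in range(1, 17)}
def pvRank : PySem.Dict String Int :=
  (PySem.List.pyRange 1 17 1).foldl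
    (fun d i => d.insert ("pose_" ++ PySem.Int.toStr i) i) PySem.Dict.empty
-- sorted((x for x in list1 + list2 if x in rank), key=rank.get); every sorted element
-- passed the 'x in rank' filter, so rank.get x is its int rank and getD with default 0 is exact.
def colab_list_alt (list1 : List String) (list2 : List String) : List String :=
  PySem.List.sorted ((list1 ++ list2).filter (fun x => pvRank.contains x))
    (fun x => pvRank.getD x 0)

-- ===== PRECONDITION & SPEC =====
def Spec_colab_list (list1 : List String) (list2 : List String) (out : List String) : Prop := out = colab_list_alt list1 list2
instance (list1 : List String) (list2 : List String) (out : List String) : Decidable (Spec_colab_list list1 list2 out) := by unfold Spec_colab_list; infer_instance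

-- ===== CLAIM (what is proved, stated in full; the proofs are below) =====
def Claim_equal_colab_list : Prop := ∀ (list1 : List String) (list2 : List String), Dom_colab_list list1 list2 → Spec_colab_list list1 list2 (colab_list list1 list2)

-- ===== LEMMAS AND PROOFS =====

-- the canonical label list, restated for the proofs
def pvSeri : List String :=
  ["pose_1","pose_2","pose_3","pose_4","pose_5","pose_6","pose_7","pose_8",
   "pose_9","pose_10","pose_11","pose_12","pose_13","pose_14","pose_15","pose_16"]

def pvKey (s : String) : Int := pvRank.getD s 0

-- A's inner scan over one list appends i once per match: it contributes replicate (count i) i.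
theorem pv_inner_scan (i : String) (l : List String) (acc : List String) :
    l.foldl (fun a x => if i == x then a ++ [i] else a) acc
      = acc ++ List.replicate (l.count i) i := by
  rw [PySem.List.foldl_append_if (fun x => i == x) (fun _ => i)]
  have hf : l.filter (fun x => i == x) = l.filter (fun x => x == i) := by
    apply List.filter_congr; intro x _; simp [eq_comm]
  rw [hf, List.map_const']
  simp [List.count_eq_length_filter]

-- A equals the per-label replicate form, concatenated over the labels.
theorem pv_A_char (seri l1 l2 : List String) (acc : List String) :
    seri.foldl (fun lst i =>
        let lst := l1.foldl (fun a x => if i == x then a ++ [i] else a) lst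
        l2.foldl (fun a x => if i == x then a ++ [i] else a) lst) acc
      = acc ++ seri.flatMap (fun i => List.replicate (l1.count i + l2.count i) i) := by
  induction seri generalizing acc with
  | nil => simp
  | cons i rest ih =>
    simp only [List.foldl_cons, List.flatMap_cons]
    rw [ih, pv_inner_scan, pv_inner_scan, List.replicate_add]
    simp [List.append_assoc]

-- insertBy passes over a prefix none of whose elements trigger 'before'
theorem pv_insertBy_pass {α : Type} (before : α → α → Bool) (x : α)
    (front rest : List α) (hf : ∀ y ∈ front, before x y = false) :
    PySem.List.insertBy before x (front ++ rest)
      = front ++ PySem.List.insertBy before x rest := by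
  induction front with
  | nil => simp
  | cons y t ih =>
    have hy : before x y = false := hf y (by simp)
    simp only [List.cons_append, PySem.List.insertBy, hy]
    simp [ih (fun z hz => hf z (by simp [hz]))]

-- insertBy puts x in front when the head (if any) triggers 'before'
theorem pv_insertBy_front {α : Type} (before : α → α → Bool) (x : α)
    (rest : List α) (hr : ∀ y ∈ rest, before x y = true) :
    PySem.List.insertBy before x rest = x :: rest := by
  cases rest with
  | nil => rfl
  | cons y t => simp [PySem.List.insertBy, hr y (by simp)]

-- inserting one label x into the rank-grouped list bumps x's group by one
theorem pv_insert_group (labels : List String) (x : String) (c : String → Nat)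
    (hx : x ∈ labels) (hpw : labels.Pairwise (fun a b => pvKey a < pvKey b)) :
    PySem.List.insertBy (fun a b => decide (pvKey a < pvKey b)) x
        (labels.flatMap (fun lab => List.replicate (c lab) lab))
      = labels.flatMap (fun lab =>
          List.replicate (if lab = x then c lab + 1 else c lab) lab) := by
  induction labels with
  | nil => cases hx
  | cons l rest ih =>
    rcases List.pairwise_cons.mp hpw with ⟨h1, hpw'⟩
    simp only [List.flatMap_cons]
    by_cases hxl : x = l
    · subst hxl
      have hrest : ∀ lab ∈ rest, lab ≠ x := by
        intro lab hlab h; exact absurd (h ▸ h1 lab hlab) (lt_irrefl _)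
      have hfront : ∀ y ∈ List.replicate (c x) x,
          (decide (pvKey x < pvKey y) : Bool) = false := by
        intro y hy; rw [List.eq_of_mem_replicate hy]; simp
      rw [pv_insertBy_pass _ _ _ _ hfront]
      have hback : ∀ y ∈ rest.flatMap (fun lab => List.replicate (c lab) lab),
          (decide (pvKey x < pvKey y) : Bool) = true := by
        intro y hy
        rcases List.mem_flatMap.mp hy with ⟨lab, hlab, hylab⟩
        rw [List.eq_of_mem_replicate hylab]
        simpa using h1 lab hlab
      rw [pv_insertBy_front _ _ _ hback, if_pos rfl]
      have hrf : rest.flatMap (fun lab =>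
            List.replicate (if lab = x then c lab + 1 else c lab) lab)
          = rest.flatMap (fun lab => List.replicate (c lab) lab) := by
        apply List.flatMap_congr; intro lab hlab; rw [if_neg (hrest lab hlab)]
      rw [hrf, List.replicate_succ']
      simp
    · have hxr : x ∈ rest := by cases hx with
        | head => exact absurd rfl hxl
        | tail _ h => exact h
      have hfront : ∀ y ∈ List.replicate (c l) l,
          (decide (pvKey x < pvKey y) : Bool) = false := by
        intro y hy; rw [List.eq_of_mem_replicate hy]
        simpa using not_lt.mpr (le_of_lt (h1 x hxr))
      rw [pv_insertBy_pass _ _ _ _ hfront, ih hxr hpw',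
        if_neg (fun h => hxl h.symm)]

-- folding the insertion over a list of labels adds its counts to every group
theorem pv_foldl_insert (labels : List String)
    (hpw : labels.Pairwise (fun a b => pvKey a < pvKey b)) (ys : List String)
    (c : String → Nat) (hys : ∀ x ∈ ys, x ∈ labels) :
    ys.foldl (fun acc x =>
        PySem.List.insertBy (fun a b => decide (pvKey a < pvKey b)) x acc)
      (labels.flatMap (fun lab => List.replicate (c lab) lab))
      = labels.flatMap (fun lab => List.replicate (c lab + ys.count lab) lab) := by
  induction ys generalizing c with
  | nil => simp
  | cons x t ih =>
    simp only [List.foldl_cons]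
    rw [pv_insert_group labels x c (hys x (by simp)) hpw,
      ih (fun lab => if lab = x then c lab + 1 else c lab)
        (fun z hz => hys z (by simp [hz]))]
    apply List.flatMap_congr; intro lab _
    congr 1
    by_cases h : lab = x
    · subst h
      rw [if_pos rfl, List.count_cons_self]
      omega
    · rw [if_neg h]
      simp [Ne.symm h]

-- pvRank as a literal dict
theorem pv_rank_eval : pvRank = PySem.Dict.mk
    [("pose_1",1),("pose_2",2),("pose_3",3),("pose_4",4),("pose_5",5),("pose_6",6),
     ("pose_7",7),("pose_8",8),("pose_9",9),("pose_10",10),("pose_11",11),("pose_12",12),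
     ("pose_13",13),("pose_14",14),("pose_15",15),("pose_16",16)] := by decide

-- the keys of pvRank are exactly the canonical labels
theorem pv_contains_iff (x : String) : pvRank.contains x = true ↔ x ∈ pvSeri := by
  rw [pv_rank_eval]
  simp [PySem.Dict.contains_mk, pvSeri]
  constructor
  · rintro (h|h|h|h|h|h|h|h|h|h|h|h|h|h|h|h) <;> simp [h.symm]
  · rintro (h|h|h|h|h|h|h|h|h|h|h|h|h|h|h|h) <;> simp [h]

theorem pv_seri_pairwise : pvSeri.Pairwise (fun a b => pvKey a < pvKey b) := by
  decide

-- ===== VERDICT (by name: the statement is the Claim_ definition above) =====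
theorem colab_list_spec : Claim_equal_colab_list := by
  intro list1 list2 _
  show colab_list list1 list2 = colab_list_alt list1 list2
  unfold colab_list colab_list_alt
  rw [pv_A_char]
  set ys := (list1 ++ list2).filter (fun x => pvRank.contains x) with hys
  have hmem : ∀ x ∈ ys, x ∈ pvSeri := by
    intro x hx
    exact (pv_contains_iff x).mp (List.of_mem_filter hx)
  have hkey : (fun x => pvRank.getD x 0) = pvKey := rfl
  rw [hkey, PySem.List.sorted_eq_foldl_insertBy ys pvKey]
  have h0 : (pvSeri.flatMap (fun lab => List.replicate ((fun _ => 0) lab) lab))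
      = ([] : List String) := by simp
  have := pv_foldl_insert pvSeri pv_seri_pairwise ys (fun _ => 0) hmem
  rw [h0] at this
  rw [this]
  simp only [List.nil_append]
  apply List.flatMap_congr
  intro lab hlab
  have hc : ys.count lab = (list1 ++ list2).count lab := by
    rw [hys]
    exact List.count_filter ((pv_contains_iff lab).mpr hlab)
  rw [hc]
  simp [List.count_append]
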